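-- pv_equiv track=rewrite | github.com/YashB63/GFG-Daily-Questions | Day 419/Good Stones/good_stones.py | goodStones
-- ===== SOURCE A (Python) =====
-- def goodStones(n, arr) -> int:
--     def dfs(i):
--         if(i<0 or i>=n):
--             return True
--         if(visited[i]>0):
--             return visited[i]==2
--         visited[i]=1
--         if(dfs(i+arr[i])):
--             visited[i]=2
--             return True
--         return False
--     visited=[0]*n
--     res=0
--     for i in range(n):
--         if(dfs(i)):
--             res+=1
--     return res
-- ===== SOURCE B (Python) =====
-- def goodStones(n, arr) -> int:
--     # Iterative: walk each successor chain with an explicit path list instead of recursion.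
--     state = [0] * max(n, 0)  # 0 unknown, 1 bad (cycle / leads to bad), 2 good
--     res = 0
--     for i in range(n):
--         path = []
--         j = i
--         while 0 <= j < n and state[j] == 0:
--             state[j] = 1
--             path.append(j)
--             j += arr[j]
--         good = j < 0 or j >= n or state[j] == 2
--         val = 2 if good else 1
--         for k in path:
--             state[k] = val
--         if good:
--             res += 1
--     return res
-- ===== Notes on version B (the rewrite author's own statement) =====
-- stated objective: alternative
-- what changed: Replaces the recursive dfs (call stack + unwinding that marks nodes 2) with an iterative walk per start that records the chain in an explicit path list, classifies the stop point once, and assigns the whole path's state in a single pass; Pre_ excludes n > len(arr), where both programs raise IndexError.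
import Mathlib
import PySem

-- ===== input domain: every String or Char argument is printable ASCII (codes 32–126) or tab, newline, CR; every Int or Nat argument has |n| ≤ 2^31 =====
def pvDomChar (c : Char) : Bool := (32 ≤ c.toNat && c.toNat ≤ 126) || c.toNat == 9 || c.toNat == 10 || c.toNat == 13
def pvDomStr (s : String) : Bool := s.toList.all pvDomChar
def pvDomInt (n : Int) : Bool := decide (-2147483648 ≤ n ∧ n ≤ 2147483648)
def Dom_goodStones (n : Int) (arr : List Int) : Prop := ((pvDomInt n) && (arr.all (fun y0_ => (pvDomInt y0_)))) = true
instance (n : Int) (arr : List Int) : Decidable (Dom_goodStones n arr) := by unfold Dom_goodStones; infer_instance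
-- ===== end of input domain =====

-- B replaces A's recursive dfs by an iterative chain walk with an explicit path list
-- (same cost, different decomposition). Equivalence of the RETURN value is proved on Pre_.

-- ===== PORT A =====
-- A's dfs, with fuel making the recursion structural; fuel n.toNat+1 always suffices
-- (each recursive call turns one 0-entry of visited into 1, and count 0 ≤ n.toNat).
def dfsA (n : Int) (arr : List Int) : Nat → Int → List Int → Bool × List Int
  | 0, _, v => (false, v)
  | fuel+1, i, v =>
    if i < 0 ∨ n ≤ i then (true, v)
    else if 0 < v.getD i.toNat 0 then (v.getD i.toNat 0 == 2, v)
    else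
      let r := dfsA n arr fuel (i + arr.getD i.toNat 0) (v.set i.toNat 1)
      if r.1 then (true, r.2.set i.toNat 2) else (false, r.2)

def goodStones (n : Int) (arr : List Int) : Int :=
  ((List.range n.toNat).foldl
    (fun (st : Int × List Int) i =>
      let r := dfsA n arr (n.toNat + 1) (Int.ofNat i) st.2
      (st.1 + (if r.1 then 1 else 0), r.2))
    (0, List.replicate n.toNat 0)).1

-- ===== PORT B =====
-- B's while loop, with the same sufficient fuel; returns (stop index, state, path).
def walkB (n : Int) (arr : List Int) : Nat → Int → List Int → List Nat → Int × List Int × List Nat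
  | 0, j, v, p => (j, v, p)
  | fuel+1, j, v, p =>
    if 0 ≤ j ∧ j < n ∧ v.getD j.toNat 0 = 0 then
      walkB n arr fuel (j + arr.getD j.toNat 0) (v.set j.toNat 1) (p ++ [j.toNat])
    else (j, v, p)

def goodOf (n : Int) (j : Int) (v : List Int) : Bool :=
  j < 0 || n ≤ j || v.getD j.toNat 0 == 2

def assignB (g : Bool) (p : List Nat) (v : List Int) : List Int :=
  p.foldl (fun w k => w.set k (if g then 2 else 1)) v

def goodStones_alt (n : Int) (arr : List Int) : Int :=
  ((List.range n.toNat).foldl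
    (fun (st : Int × List Int) i =>
      let w := walkB n arr (n.toNat + 1) (Int.ofNat i) st.2 []
      let g := goodOf n w.1 w.2.1
      (st.1 + (if g then 1 else 0), assignB g w.2.2 w.2.1))
    (0, List.replicate n.toNat 0)).1

-- ===== PRECONDITION & SPEC =====
-- Pre_ excludes n > len(arr): there A reaches arr[i] for some i ≥ len(arr) and raises IndexError.
def Pre_goodStones (n : Int) (arr : List Int) : Prop := n ≤ (arr.length : Int)
instance (n : Int) (arr : List Int) : Decidable (Pre_goodStones n arr) := by unfold Pre_goodStones; infer_instance

def pvWitness_goodStones : Int × List Int := (4, [1, -2, 2, 0])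

def Spec_goodStones (n : Int) (arr : List Int) (out : Int) : Prop := out = goodStones_alt n arr
instance (n : Int) (arr : List Int) (out : Int) : Decidable (Spec_goodStones n arr out) := by unfold Spec_goodStones; infer_instance

-- ===== CLAIM (what is proved, stated in full; the proofs are below) =====
def Claim_equal_goodStones : Prop := ∀ (n : Int) (arr : List Int), Dom_goodStones n arr → Pre_goodStones n arr → Spec_goodStones n arr (goodStones n arr)

-- ===== LEMMAS AND PROOFS =====

-- visited/state entries are always 0, 1 or 2
def inv3 (v : List Int) : Prop := ∀ x ∈ v, x = 0 ∨ x = 1 ∨ x = 2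

lemma inv3_set {v : List Int} (h : inv3 v) {k : Nat} {a : Int}
    (ha : a = 0 ∨ a = 1 ∨ a = 2) : inv3 (v.set k a) := by
  intro x hx
  rcases List.mem_or_eq_of_mem_set hx with h1 | h2
  · exact h x h1
  · exact h2 ▸ ha

-- walkB with accumulator p is walkB with [] with p prepended
lemma walkB_acc (n : Int) (arr : List Int) :
    ∀ (fuel : Nat) (j : Int) (v : List Int) (p : List Nat),
      walkB n arr fuel j v p =
        ((walkB n arr fuel j v []).1, (walkB n arr fuel j v []).2.1,
          p ++ (walkB n arr fuel j v []).2.2) := by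
  intro fuel
  induction fuel with
  | zero => intro j v p; simp [walkB]
  | succ f ih =>
    intro j v p
    simp only [walkB]
    split
    · rw [ih _ _ (p ++ [j.toNat]), ih _ _ ([] ++ [j.toNat])]
      simp
    · simp

-- assignB commutes with a pre-applied set of the same written value
lemma assignB_set (g : Bool) : ∀ (p : List Nat) (v : List Int) (k : Nat),
    assignB g p (v.set k (if g then 2 else 1)) = (assignB g p v).set k (if g then 2 else 1) := by
  intro p
  induction p with
  | nil => intro v k; simp [assignB]
  | cons h t ih =>
    intro v k
    simp only [assignB, List.foldl_cons]
    by_cases hk : h = k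
    · subst hk
      rw [List.set_set]
      have := ih (v.set h (if g then 2 else 1)) h
      simp only [assignB] at this
      rw [← this, List.set_set]
    · rw [List.set_comm _ _ (Ne.symm hk)]
      exact ih (v.set h (if g then 2 else 1)) k

-- setting an entry to the value it already holds is the identity
lemma set_eq_self {v : List Int} {k : Nat} {a : Int} (hk : k < v.length)
    (h : v.getD k 0 = a) : v.set k a = v := by
  apply List.ext_getElem (by simp)
  intro m h1 h2
  rw [List.getElem_set]
  split
  · subst a; next heq => subst heq; rw [List.getD_eq_getElem v 0 hk]
  · rfl

lemma getD_set_ne {l : List Int} {i k : Nat} {a d : Int} (h : k ≠ i) :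
    (l.set i a).getD k d = l.getD k d := by
  rw [List.getD_eq_getElem?_getD, List.getD_eq_getElem?_getD,
    List.getElem?_set_ne (Ne.symm h)]

-- main correspondence: A's dfs computes exactly B's walk + classify + assign
lemma dfs_walk (n : Int) (arr : List Int) :
    ∀ (fuel : Nat) (i : Int) (v : List Int), inv3 v → n.toNat ≤ v.length →
      v.count 0 < fuel →
      (dfsA n arr fuel i v).2.length = v.length ∧
      inv3 (dfsA n arr fuel i v).2 ∧
      (∀ k, v.getD k 0 ≠ 0 → (dfsA n arr fuel i v).2.getD k 0 = v.getD k 0) ∧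
      dfsA n arr fuel i v =
        ((goodOf n (walkB n arr fuel i v []).1 (walkB n arr fuel i v []).2.1),
          assignB (goodOf n (walkB n arr fuel i v []).1 (walkB n arr fuel i v []).2.1)
            (walkB n arr fuel i v []).2.2 (walkB n arr fuel i v []).2.1) := by
  intro fuel
  induction fuel with
  | zero => intro i v _ _ hc; exact absurd hc (Nat.not_lt_zero _)
  | succ f ih =>
    intro i v hinv hlen hc
    by_cases hout : i < 0 ∨ n ≤ i
    · have hw : walkB n arr (f+1) i v [] = (i, v, []) := by
        simp only [walkB]
        rw [if_neg (by omega)]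
      have hg : goodOf n i v = true := by
        simp only [goodOf]
        rcases hout with h | h
        · rw [decide_eq_true h]; simp
        · rw [decide_eq_true h]; simp
      have dA : dfsA n arr (f+1) i v = (true, v) := by
        simp only [dfsA]
        rw [if_pos hout]
      rw [dA, hw, hg]
      exact ⟨rfl, hinv, fun k _ => rfl, rfl⟩
    · have h0 : 0 ≤ i := by omega
      have hn : i < n := by omega
      have hixlt : i.toNat < v.length := by omega
      by_cases hez : v.getD i.toNat 0 = 0
      · -- unvisited: A recurses, B walks one step
        have hv1len : (v.set i.toNat 1).length = v.length := List.length_set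
        have hcnt : (v.set i.toNat 1).count 0 < f := by
          have heq := List.count_set (a := (1 : Int)) (b := (0 : Int)) (l := v) hixlt
          have hvi : v[i.toNat] = 0 := by
            rw [← List.getD_eq_getElem v 0 hixlt]; exact hez
          have hpos : 0 < v.count 0 := by
            rw [List.count_pos_iff]
            exact hvi ▸ List.getElem_mem hixlt
          simp [hvi] at heq
          omega
        have hinv1 : inv3 (v.set i.toNat 1) := inv3_set hinv (by tauto)
        obtain ⟨L, I, U, E⟩ := ih (i + arr.getD i.toNat 0) (v.set i.toNat 1) hinv1
          (hv1len ▸ hlen) hcnt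
        have hnlt : ¬ (0 : Int) < v.getD i.toNat 0 := by rw [hez]; exact lt_irrefl 0
        have hA : dfsA n arr (f+1) i v =
            (if (dfsA n arr f (i + arr.getD i.toNat 0) (v.set i.toNat 1)).1
             then (true, (dfsA n arr f (i + arr.getD i.toNat 0) (v.set i.toNat 1)).2.set i.toNat 2)
             else (false, (dfsA n arr f (i + arr.getD i.toNat 0) (v.set i.toNat 1)).2)) := by
          simp only [dfsA]
          rw [if_neg hout, if_neg hnlt]
        have hwalk : walkB n arr (f+1) i v [] =
            ((walkB n arr f (i + arr.getD i.toNat 0) (v.set i.toNat 1) []).1,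
             (walkB n arr f (i + arr.getD i.toNat 0) (v.set i.toNat 1) []).2.1,
             i.toNat :: (walkB n arr f (i + arr.getD i.toNat 0) (v.set i.toNat 1) []).2.2) := by
          simp only [walkB]
          rw [if_pos ⟨h0, hn, hez⟩, walkB_acc]
          simp
        rw [hA, hwalk, E]
        set w := walkB n arr f (i + arr.getD i.toNat 0) (v.set i.toNat 1) [] with hwdef
        set g := goodOf n w.1 w.2.1 with hgdef
        set s := assignB g w.2.2 w.2.1 with hsdef
        have hassign : assignB g (i.toNat :: w.2.2) w.2.1 = s.set i.toNat (if g then 2 else 1) := by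
          rw [hsdef]
          show assignB g w.2.2 (w.2.1.set i.toNat (if g then 2 else 1)) = _
          exact assignB_set g w.2.2 w.2.1 i.toNat
        have hs_len : s.length = v.length := by
          have := L; rw [E] at this
          rw [hsdef]; exact this.trans hv1len
        have hs_inv : inv3 s := by
          have := I; rw [E] at this; exact this
        have hs_unt : ∀ k, (v.set i.toNat 1).getD k 0 ≠ 0 →
            s.getD k 0 = (v.set i.toNat 1).getD k 0 := by
          intro k hk
          have := U k hk; rw [E] at this; exact this
        have hvi1 : (v.set i.toNat 1).getD i.toNat 0 = 1 := by
          rw [List.getD_eq_getElem?_getD, List.getElem?_set_self hixlt]; rfl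
        cases hgcase : g with
        | true =>
          rw [hgcase] at hassign
          simp only [reduceIte] at hassign ⊢
          refine ⟨by simp [hs_len], inv3_set hs_inv (by tauto), ?_, by rw [hassign]⟩
          intro k hk
          have hki : k ≠ i.toNat := fun h => hk (h ▸ hez)
          show (s.set i.toNat 2).getD k 0 = v.getD k 0
          rw [getD_set_ne hki, hs_unt k (by rwa [getD_set_ne hki]), getD_set_ne hki]
        | false =>
          rw [hgcase] at hassign
          simp only [Bool.false_eq_true, reduceIte] at hassign ⊢
          have hsi : s.set i.toNat 1 = s := by
            apply set_eq_self (by omega)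
            rw [hs_unt i.toNat (by rw [hvi1]; norm_num), hvi1]
          refine ⟨hs_len, hs_inv, ?_, by rw [hassign, hsi]⟩
          intro k hk
          have hki : k ≠ i.toNat := fun h => hk (h ▸ hez)
          rw [hs_unt k (by rwa [getD_set_ne hki]), getD_set_ne hki]
      · -- already visited: A returns from memo, B's walk does not start
        have hmem : v.getD i.toNat 0 ∈ v := by
          rw [List.getD_eq_getElem v 0 hixlt]; exact List.getElem_mem hixlt
        have hpos : 0 < v.getD i.toNat 0 := by
          rcases hinv _ hmem with h | h | h
          · exact absurd h hez
          · rw [h]; norm_num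
          · rw [h]; norm_num
        have hw : walkB n arr (f+1) i v [] = (i, v, []) := by
          simp only [walkB]
          rw [if_neg (fun hcond => hez hcond.2.2)]
        have hg : goodOf n i v = (v.getD i.toNat 0 == 2) := by
          simp only [goodOf]
          rw [decide_eq_false (by omega : ¬ i < 0), decide_eq_false (by omega : ¬ n ≤ i)]
          simp
        have dA : dfsA n arr (f+1) i v = (v.getD i.toNat 0 == 2, v) := by
          simp only [dfsA]
          rw [if_neg hout, if_pos hpos]
        rw [dA, hw, hg]
        exact ⟨rfl, hinv, fun k _ => rfl, rfl⟩

-- the two outer loops agree from any common state satisfying the invariant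
lemma loop_eq (n : Int) (arr : List Int) :
    ∀ (l : List Nat) (st : Int × List Int), inv3 st.2 → st.2.length = n.toNat →
      l.foldl (fun (st : Int × List Int) i =>
          let r := dfsA n arr (n.toNat + 1) (Int.ofNat i) st.2
          (st.1 + (if r.1 then 1 else 0), r.2)) st =
      l.foldl (fun (st : Int × List Int) i =>
          let w := walkB n arr (n.toNat + 1) (Int.ofNat i) st.2 []
          let g := goodOf n w.1 w.2.1
          (st.1 + (if g then 1 else 0), assignB g w.2.2 w.2.1)) st := by
  intro l
  induction l with
  | nil => intro st _ _; rfl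
  | cons h t ih =>
    intro st hinv hlen
    have hcnt : st.2.count 0 < n.toNat + 1 := by
      have := List.count_le_length (l := st.2) (a := (0 : Int))
      omega
    obtain ⟨L, I, _, E⟩ := dfs_walk n arr (n.toNat + 1) (Int.ofNat h) st.2 hinv
      (le_of_eq hlen.symm) hcnt
    simp only [List.foldl_cons]
    rw [E] at L I ⊢
    exact ih _ I (L.trans hlen)

-- ===== VERDICT (by name: the statement is the Claim_ definition above) =====
theorem goodStones_spec : Claim_equal_goodStones := by
  intro n arr _ _
  unfold Spec_goodStones goodStones goodStones_alt
  rw [loop_eq n arr]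
  · intro x hx
    left; exact List.eq_of_mem_replicate hx
  · exact List.length_replicate
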